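-- pv_equiv track=rewrite | github.com/a-millarch/astra | astra/evaluation/hybrid_model.py | step_to_time
-- ===== SOURCE A (Python) =====
-- def step_to_time(step):
--     """Convert step index back to time in minutes."""
--     intervals = [
--         {'start_h': 0, 'end_h': 6, 'bin_min': 10},
--         {'start_h': 6, 'end_h': 12, 'bin_min': 20},
--         {'start_h': 12, 'end_h': 24, 'bin_min': 60},
--         {'start_h': 24, 'end_h': 72, 'bin_min': 240},
--         {'start_h': 72, 'end_h': 336, 'bin_min': 720},
--         {'start_h': 336, 'end_h': 720, 'bin_min': 1440},
--         {'start_h': 720, 'end_h': 2160, 'bin_min': 10080},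
--         {'start_h': 2160, 'end_h': None, 'bin_min': 43200},
--     ]
--     bins_cum = [0]
--     for interval in intervals[:-1]:
--         duration_min = (interval['end_h'] - interval['start_h']) * 60
--         bins = duration_min // interval['bin_min']
--         bins_cum.append(bins_cum[-1] + bins)
--
--     for i in range(len(bins_cum) - 1):
--         if bins_cum[i] <= step < bins_cum[i+1]:
--             interval = intervals[i]
--             step_offset = step - bins_cum[i]
--             start_min = interval['start_h'] * 60
--             return start_min + (step_offset + 1) * interval['bin_min']
--     return None
-- ===== SOURCE B (Python) =====
-- def step_to_time(step):
--     """Convert step index back to time in minutes."""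
--     intervals = [
--         {'start_h': 0, 'end_h': 6, 'bin_min': 10},
--         {'start_h': 6, 'end_h': 12, 'bin_min': 20},
--         {'start_h': 12, 'end_h': 24, 'bin_min': 60},
--         {'start_h': 24, 'end_h': 72, 'bin_min': 240},
--         {'start_h': 72, 'end_h': 336, 'bin_min': 720},
--         {'start_h': 336, 'end_h': 720, 'bin_min': 1440},
--         {'start_h': 720, 'end_h': 2160, 'bin_min': 10080},
--         {'start_h': 2160, 'end_h': None, 'bin_min': 43200},
--     ]
--     offset = step
--     for interval in intervals[:-1]:
--         duration_min = (interval['end_h'] - interval['start_h']) * 60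
--         bins = duration_min // interval['bin_min']
--         if 0 <= offset < bins:
--             return interval['start_h'] * 60 + (offset + 1) * interval['bin_min']
--         offset -= bins
--     return None
-- ===== Notes on version B (the rewrite author's own statement) =====
-- stated objective: simpler
-- what changed: Drops the precomputed bins_cum prefix-sum list and the second index loop; a single pass over intervals[:-1] keeps a running offset and returns as soon as the offset falls inside the current interval's bin count.
import Mathlib
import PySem

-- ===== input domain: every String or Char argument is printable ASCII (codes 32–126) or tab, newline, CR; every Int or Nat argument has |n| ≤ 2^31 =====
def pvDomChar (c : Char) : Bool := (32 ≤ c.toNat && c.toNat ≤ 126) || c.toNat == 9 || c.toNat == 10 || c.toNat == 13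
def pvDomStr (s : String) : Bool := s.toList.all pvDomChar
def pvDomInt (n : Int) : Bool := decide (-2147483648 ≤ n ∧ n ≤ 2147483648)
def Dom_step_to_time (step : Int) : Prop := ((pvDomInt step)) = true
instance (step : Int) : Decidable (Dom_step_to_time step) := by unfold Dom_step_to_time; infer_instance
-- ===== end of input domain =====

-- B replaces A's two-pass scheme (precomputed bins_cum prefix sums + an index loop) by one
-- pass over intervals[:-1] with a running offset; same return value everywhere (objective: simpler).

-- ===== PORT A =====
-- intervals table shared shape: (start_h, end_h, bin_min); end_h is `none` only in the last row,
-- which neither program's loop ever reads (both slice intervals[:-1]), so `getD 0` on end_h is exact.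
def pvIntervals : List (Int × Option Int × Int) :=
  [(0, some 6, 10), (6, some 12, 20), (12, some 24, 60), (24, some 72, 240),
   (72, some 336, 720), (336, some 720, 1440), (720, some 2160, 10080), (2160, none, 43200)]

-- second loop of A: for i in range(len(bins_cum)-1): if bins_cum[i] <= step < bins_cum[i+1]: return …
-- indices i and i+1 are always in range (i < len-1), so getD is exact here.
def pvFindLoop (step : Int) (bins_cum : List Int) (intervals : List (Int × Option Int × Int)) : List Nat → Option Int
  | [] => none
  | i :: rest =>
    if bins_cum.getD i 0 ≤ step ∧ step < bins_cum.getD (i+1) 0 then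
      let iv := intervals.getD i (0, none, 0)
      let step_offset := step - bins_cum.getD i 0
      let start_min := iv.1 * 60
      some (start_min + (step_offset + 1) * iv.2.2)
    else pvFindLoop step bins_cum intervals rest

def step_to_time (step : Int) : Option Int :=
  let intervals := pvIntervals
  let bins_cum := intervals.dropLast.foldl
    (fun acc iv =>
      let duration_min := (iv.2.1.getD 0 - iv.1) * 60
      let bins := PySem.Int.floordiv duration_min iv.2.2
      acc ++ [acc.getLastD 0 + bins]) [0]
  pvFindLoop step bins_cum intervals (List.range (bins_cum.length - 1))

-- ===== PORT B =====
-- B: single pass over intervals[:-1] with a running offset; returns on the first interval hit.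
def pvAltLoop (offset : Int) : List (Int × Option Int × Int) → Option Int
  | [] => none
  | iv :: rest =>
    let duration_min := (iv.2.1.getD 0 - iv.1) * 60
    let bins := PySem.Int.floordiv duration_min iv.2.2
    if 0 ≤ offset ∧ offset < bins then some (iv.1 * 60 + (offset + 1) * iv.2.2)
    else pvAltLoop (offset - bins) rest

def step_to_time_alt (step : Int) : Option Int :=
  pvAltLoop step pvIntervals.dropLast

-- ===== PRECONDITION & SPEC =====
def Spec_step_to_time (step : Int) (out : Option Int) : Prop := out = step_to_time_alt step
instance (step : Int) (out : Option Int) : Decidable (Spec_step_to_time step out) := by unfold Spec_step_to_time; infer_instance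

-- ===== CLAIM (what is proved, stated in full; the proofs are below) =====
def Claim_equal_step_to_time : Prop := ∀ (step : Int), Dom_step_to_time step → Spec_step_to_time step (step_to_time step)

-- ===== LEMMAS AND PROOFS =====

-- ===== VERDICT (by name: the statement is the Claim_ definition above) =====
theorem step_to_time_spec : Claim_equal_step_to_time := by
  intro step _
  unfold Spec_step_to_time step_to_time step_to_time_alt pvIntervals
  simp only [List.dropLast, List.foldl, pvAltLoop, Option.getD, List.getLastD,
    PySem.Int.floordiv]
  norm_num [show List.range 7 = [0,1,2,3,4,5,6] from rfl, pvFindLoop, List.getD,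
    Option.getD, show Int.fdiv 360 10 = 36 from rfl, show Int.fdiv 360 20 = 18 from rfl,
    show Int.fdiv 720 60 = 12 from rfl, show Int.fdiv 2880 240 = 12 from rfl,
    show Int.fdiv 15840 720 = 22 from rfl, show Int.fdiv 23040 1440 = 16 from rfl,
    show Int.fdiv 86400 10080 = 8 from rfl]
  split_ifs <;> first | rfl | omega | (rw [Option.some_inj]; omega) | simp_all
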